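-- pv_equiv track=rewrite | github.com/sheed17/neyma-platform | pipeline/revenue_brief_renderer.py | _primary_service_from_missing
-- ===== SOURCE A (Python) =====
-- from typing import Dict, Any, List, Optional, Tuple
--
-- PRIMARY_SERVICE_PRIORITY: List[Tuple[str, str]] = [
--     ("implants", "Implants"),
--     ("orthodontics", "Orthodontics"),
--     ("invisalign", "Invisalign"),
--     ("orthodontic", "Orthodontic"),
--     ("veneers", "Veneers"),
--     ("cosmetic", "Cosmetic"),
--     ("sedation", "Sedation"),
--     ("crowns", "Crowns"),
--     ("sleep apnea", "Sleep Apnea"),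
--     ("emergency", "Emergency"),
-- ]
--
-- def _primary_service_from_missing(missing: List[str]) -> Optional[Tuple[str, str]]:
--     """
--     Select ONE primary service from missing_high_value_pages.
--     Priority: implants > invisalign > orthodontic > veneers > cosmetic.
--     Returns (canonical_key, display_name) or None if no match.
--     """
--     if not missing:
--         return None
--     missing_lower = [str(m).strip().lower() for m in missing if m]
--     for key, display in PRIMARY_SERVICE_PRIORITY:
--         for m in missing_lower:
--             if key in m or m in key:
--                 return (key, display)
--         if key == "orthodontic":
--             if any(any(x in m for x in ("orthodont", "brace")) for m in missing_lower):
--                 return ("orthodontic", "Orthodontic")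
--     return None
-- ===== SOURCE B (Python) =====
-- from typing import List, Optional, Tuple
--
-- PRIMARY_SERVICE_PRIORITY: List[Tuple[str, str]] = [
--     ("implants", "Implants"),
--     ("orthodontics", "Orthodontics"),
--     ("invisalign", "Invisalign"),
--     ("orthodontic", "Orthodontic"),
--     ("veneers", "Veneers"),
--     ("cosmetic", "Cosmetic"),
--     ("sedation", "Sedation"),
--     ("crowns", "Crowns"),
--     ("sleep apnea", "Sleep Apnea"),
--     ("emergency", "Emergency"),
-- ]
--
-- def _primary_service_from_missing(missing: List[str]) -> Optional[Tuple[str, str]]: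
--     """One pass over the missing strings, keeping the minimum matched priority index."""
--     if not missing:
--         return None
--     best = None
--     for raw in missing:
--         if not raw:
--             continue
--         m = str(raw).strip().lower()
--         idx = next((i for i, (key, _) in enumerate(PRIMARY_SERVICE_PRIORITY)
--                     if key in m or m in key), None)
--         # the fuzzy orthodontic keywords count as a match at priority index 3
--         if ("orthodont" in m or "brace" in m) and (idx is None or idx > 3):
--             idx = 3
--         if idx is not None and (best is None or idx < best):
--             best = idx
--     if best is None:
--         return None
--     return PRIMARY_SERVICE_PRIORITY[best]
-- ===== Notes on version B (the rewrite author's own statement) =====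
-- stated objective: alternative
-- what changed: B inverts the loop nesting: one pass over the cleaned missing strings computing each string's best-matching priority index (fuzzy orthodontic keywords mapped to index 3) and keeping the running minimum, instead of A's scan of the priority list with an inner scan of the strings and early return.
import Mathlib
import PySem

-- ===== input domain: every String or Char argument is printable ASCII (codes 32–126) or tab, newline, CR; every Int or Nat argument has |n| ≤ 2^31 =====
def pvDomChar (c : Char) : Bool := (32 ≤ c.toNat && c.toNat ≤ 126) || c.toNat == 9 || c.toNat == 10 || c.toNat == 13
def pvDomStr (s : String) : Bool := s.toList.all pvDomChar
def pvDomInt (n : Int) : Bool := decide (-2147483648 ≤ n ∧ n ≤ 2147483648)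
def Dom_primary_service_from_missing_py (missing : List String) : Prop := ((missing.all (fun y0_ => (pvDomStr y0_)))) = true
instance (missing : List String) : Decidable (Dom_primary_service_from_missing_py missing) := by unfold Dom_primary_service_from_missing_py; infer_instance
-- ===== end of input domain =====

-- B inverts the loop nesting (one pass over the strings keeping the minimum matched
-- priority index) instead of A's priority-list scan with early return; same results.

-- shared module constant and small expression helpers (identical expressions in both Pythons)
def pvPrio : List (String × String) :=
  [("implants", "Implants"), ("orthodontics", "Orthodontics"), ("invisalign", "Invisalign"),
   ("orthodontic", "Orthodontic"), ("veneers", "Veneers"), ("cosmetic", "Cosmetic"),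
   ("sedation", "Sedation"), ("crowns", "Crowns"), ("sleep apnea", "Sleep Apnea"),
   ("emergency", "Emergency")]

def pvClean (m : String) : String := PySem.Str.lower (PySem.Str.strip m)
def pvMatch (key m : String) : Bool := PySem.Str.isIn key m || PySem.Str.isIn m key
def pvFuzzy (m : String) : Bool := PySem.Str.isIn "orthodont" m || PySem.Str.isIn "brace" m

-- ===== PORT A =====
-- outer loop over the priority list, inner early-returning scan of missing_lower
def pvALoop (ml : List String) : List (String × String) → Option (String × String)
  | [] => none
  | (key, display) :: rest =>
    if ml.any (fun m => pvMatch key m) then some (key, display)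
    else if key == "orthodontic" then
      if ml.any (fun m => pvFuzzy m) then some ("orthodontic", "Orthodontic")
      else pvALoop ml rest
    else pvALoop ml rest

def primary_service_from_missing_py (missing : List String) : Option (String × String) :=
  if missing = [] then none
  else pvALoop ((missing.filter (fun m => m ≠ "")).map (fun m => pvClean m)) pvPrio

-- ===== PORT B =====
-- per-string best priority index: first two-way substring match, fuzzy keywords count as index 3
def pvIdxOf (m : String) : Option Nat :=
  let idx0 := pvPrio.findIdx? (fun kd => pvMatch kd.1 m)
  if pvFuzzy m && (match idx0 with | none => true | some j => decide (3 < j)) then some 3 else idx0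

def pvBUpd (best idx : Option Nat) : Option Nat :=
  match idx with
  | none => best
  | some j => match best with
    | none => some j
    | some b => if j < b then some j else some b

def pvBLoop : List String → Option Nat → Option Nat
  | [], best => best
  | raw :: rest, best =>
    if raw = "" then pvBLoop rest best
    else pvBLoop rest (pvBUpd best (pvIdxOf (pvClean raw)))

def primary_service_from_missing_py_alt (missing : List String) : Option (String × String) :=
  if missing = [] then none
  else match pvBLoop missing none with
    | none => none
    | some b => pvPrio[b]?

-- ===== PRECONDITION & SPEC =====
def Spec_primary_service_from_missing_py (missing : List String) (out : Option (String × String)) : Prop := out = primary_service_from_missing_py_alt missing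
instance (missing : List String) (out : Option (String × String)) : Decidable (Spec_primary_service_from_missing_py missing out) := by unfold Spec_primary_service_from_missing_py; infer_instance

-- ===== CLAIM (what is proved, stated in full; the proofs are below) =====
def Claim_equal_primary_service_from_missing_py : Prop := ∀ (missing : List String), Dom_primary_service_from_missing_py missing → Spec_primary_service_from_missing_py missing (primary_service_from_missing_py missing)

-- ===== LEMMAS AND PROOFS =====

-- the effective match test of priority level i (fuzzy keywords fold into level 3)
def pvT (i : Nat) (m : String) : Bool :=
  (match pvPrio[i]? with | some kd => pvMatch kd.1 m | none => false) || (i == 3 && pvFuzzy m)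

-- least index in the list satisfying p, else 10
def pvLb (p : Nat → Bool) : List Nat → Nat
  | [] => 10
  | i :: rest => if p i then i else pvLb p rest

def pvIdxs : List Nat := [0, 1, 2, 3, 4, 5, 6, 7, 8, 9]

def pvRank (m : String) : Nat := pvLb (fun i => pvT i m) pvIdxs
def pvAIdx (L : List String) : Nat := pvLb (fun i => L.any (fun m => pvT i m)) pvIdxs
def pvEnc (o : Option Nat) : Nat := o.getD 10
def pvCleanL (raws : List String) : List String :=
  (raws.filter (fun m => m ≠ "")).map (fun m => pvClean m)

lemma pvLb_ge (p : Nat → Bool) (l : List Nat) (i : Nat) (hl : ∀ j ∈ l, i ≤ j)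
    (h10 : i ≤ 10) : i ≤ pvLb p l := by
  induction l with
  | nil => simpa [pvLb]
  | cons a t ih =>
    simp only [pvLb]
    split_ifs
    · exact hl a (by simp)
    · exact ih (fun j hj => hl j (by simp [hj]))

lemma pvLb_le (p : Nat → Bool) (l : List Nat) (hl : ∀ j ∈ l, j ≤ 10) : pvLb p l ≤ 10 := by
  induction l with
  | nil => simp [pvLb]
  | cons a t ih =>
    simp only [pvLb]
    split_ifs
    · exact hl a (by simp)
    · exact ih (fun j hj => hl j (by simp [hj]))

lemma pvLb_or (p q : Nat → Bool) (l : List Nat) (hs : l.Pairwise (· ≤ ·))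
    (hl : ∀ j ∈ l, j ≤ 10) :
    pvLb (fun j => p j || q j) l = min (pvLb p l) (pvLb q l) := by
  induction l with
  | nil => simp [pvLb]
  | cons a t ih =>
    have ha : ∀ j ∈ t, a ≤ j := by
      intro j hj; exact (List.pairwise_cons.mp hs).1 j hj
    have ha10 : a ≤ 10 := hl a (by simp)
    have ht : ∀ j ∈ t, j ≤ 10 := fun j hj => hl j (by simp [hj])
    by_cases hp : p a = true
    · by_cases hq : q a = true
      · simp [pvLb, hp, hq]
      · rw [Bool.not_eq_true] at hq
        have := pvLb_ge q t a ha ha10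
        simp [pvLb, hp, hq]
        omega
    · rw [Bool.not_eq_true] at hp
      by_cases hq : q a = true
      · have := pvLb_ge p t a ha ha10
        simp [pvLb, hp, hq]
        omega
      · rw [Bool.not_eq_true] at hq
        simp only [pvLb, hp, hq, Bool.or_self]
        exact ih (List.pairwise_cons.mp hs).2 ht

lemma pvAny_or (L : List String) (p q : String → Bool) :
    L.any (fun m => p m || q m) = (L.any (fun m => p m) || L.any (fun m => q m)) := by
  induction L with
  | nil => rfl
  | cons a t ih =>
    cases hp : p a <;> cases hq : q a <;> simp [List.any_cons, hp, hq, ih]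

lemma pvIdxs_sorted : pvIdxs.Pairwise (· ≤ ·) := by decide
lemma pvIdxs_le : ∀ j ∈ pvIdxs, j ≤ 10 := by decide

lemma pvRank_le (m : String) : pvRank m ≤ 10 := pvLb_le _ _ pvIdxs_le
lemma pvAIdx_le (L : List String) : pvAIdx L ≤ 10 := pvLb_le _ _ pvIdxs_le

-- B's per-string index equals pvRank (none encodes 10)
lemma pvIdxOf_eq (m : String) :
    pvIdxOf m = if pvRank m = 10 then none else some (pvRank m) := by
  simp only [pvIdxOf, pvRank, pvIdxs, pvLb, pvT, pvPrio, List.findIdx?_cons, List.findIdx?_nil]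
  simp only [List.getElem?_cons_zero, List.getElem?_cons_succ]
  obtain ⟨b0, h0⟩ : ∃ b, pvMatch "implants" m = b := ⟨_, rfl⟩
  obtain ⟨b1, h1⟩ : ∃ b, pvMatch "orthodontics" m = b := ⟨_, rfl⟩
  obtain ⟨b2, h2⟩ : ∃ b, pvMatch "invisalign" m = b := ⟨_, rfl⟩
  obtain ⟨b3, h3⟩ : ∃ b, pvMatch "orthodontic" m = b := ⟨_, rfl⟩
  obtain ⟨b4, h4⟩ : ∃ b, pvMatch "veneers" m = b := ⟨_, rfl⟩
  obtain ⟨b5, h5⟩ : ∃ b, pvMatch "cosmetic" m = b := ⟨_, rfl⟩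
  obtain ⟨b6, h6⟩ : ∃ b, pvMatch "sedation" m = b := ⟨_, rfl⟩
  obtain ⟨b7, h7⟩ : ∃ b, pvMatch "crowns" m = b := ⟨_, rfl⟩
  obtain ⟨b8, h8⟩ : ∃ b, pvMatch "sleep apnea" m = b := ⟨_, rfl⟩
  obtain ⟨b9, h9⟩ : ∃ b, pvMatch "emergency" m = b := ⟨_, rfl⟩
  obtain ⟨f, hf⟩ : ∃ b, pvFuzzy m = b := ⟨_, rfl⟩
  simp only [h0, h1, h2, h3, h4, h5, h6, h7, h8, h9, hf]
  clear h0 h1 h2 h3 h4 h5 h6 h7 h8 h9 hf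
  revert b0 b1 b2 b3 b4 b5 b6 b7 b8 b9 f
  decide

lemma pvIfOr {α : Type} (a b : Bool) (x y : α) :
    (if a = true then x else if b = true then x else y) = if (a || b) = true then x else y := by
  cases a <;> cases b <;> simp

-- A's priority scan returns the entry at the least effective level
set_option maxHeartbeats 2000000 in
lemma pvA_eq (L : List String) : pvALoop L pvPrio = pvPrio[(pvAIdx L)]? := by
  simp only [pvPrio, pvALoop, pvAIdx, pvIdxs, pvLb, pvT]
  simp only [List.getElem?_cons_zero, List.getElem?_cons_succ, Nat.reduceBEq,
    String.reduceBEq, Bool.false_and, Bool.true_and, Bool.or_false, if_true, if_false,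
    Bool.false_eq_true, Bool.true_eq_false, ite_false, ite_true]
  simp only [pvAny_or]
  simp only [pvIfOr]
  split_ifs <;> rfl

lemma pvAIdx_nil : pvAIdx [] = 10 := by decide

lemma pvAIdx_cons (m : String) (L : List String) :
    pvAIdx (m :: L) = min (pvRank m) (pvAIdx L) := by
  have h : (fun i => (m :: L).any (pvT i)) = fun i => pvT i m || L.any (pvT i) := by
    funext i; simp [List.any_cons]
  rw [pvAIdx, h, pvLb_or _ _ _ pvIdxs_sorted pvIdxs_le]
  rfl

lemma pvBUpd_enc (best : Option Nat) (m : String) (hb : pvEnc best ≤ 10) :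
    pvEnc (pvBUpd best (pvIdxOf m)) = min (pvEnc best) (pvRank m) := by
  have hr := pvRank_le m
  rw [pvIdxOf_eq]
  by_cases h : pvRank m = 10
  · cases best <;> simp [h, pvBUpd, pvEnc] at hb ⊢ <;> omega
  · cases best with
    | none =>
      simp [h, pvBUpd, pvEnc]
      omega
    | some b =>
      simp only [h, if_false, pvBUpd, pvEnc] at hb ⊢
      split_ifs <;> simp <;> omega

lemma pvBLoop_enc (raws : List String) (best : Option Nat) (hb : pvEnc best ≤ 10) :
    pvEnc (pvBLoop raws best) = min (pvEnc best) (pvAIdx (pvCleanL raws)) := by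
  induction raws generalizing best with
  | nil =>
    simp [pvBLoop, pvCleanL, pvAIdx_nil]
    omega
  | cons r t ih =>
    by_cases hr : r = ""
    · rw [show pvCleanL (r :: t) = pvCleanL t by simp [pvCleanL, hr]]
      simp only [pvBLoop, hr, if_true]
      exact ih best hb
    · rw [show pvCleanL (r :: t) = pvClean r :: pvCleanL t by simp [pvCleanL, hr]]
      simp only [pvBLoop, hr, if_false]
      rw [ih _ (by rw [pvBUpd_enc best (pvClean r) hb]; omega),
          pvBUpd_enc best (pvClean r) hb, pvAIdx_cons]
      omega

lemma pvMatch_render (o : Option Nat) :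
    (match o with | none => none | some b => pvPrio[b]?) = pvPrio[(pvEnc o)]? := by
  cases o <;> rfl

-- ===== VERDICT (by name: the statement is the Claim_ definition above) =====
theorem primary_service_from_missing_py_spec : Claim_equal_primary_service_from_missing_py := by
  intro missing _
  unfold Spec_primary_service_from_missing_py
  unfold primary_service_from_missing_py primary_service_from_missing_py_alt
  by_cases h : missing = []
  · simp [h]
  · simp only [h, if_false]
    have hA : (missing.filter (fun m => m ≠ "")).map (fun m => pvClean m) = pvCleanL missing := rfl
    rw [hA, pvMatch_render, pvA_eq, pvBLoop_enc missing none (by simp [pvEnc])]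
    have hle := pvAIdx_le (pvCleanL missing)
    have h10 : pvEnc none = 10 := rfl
    congr 1
    omega
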